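-- pv_equiv track=rewrite | github.com/um-computacion-tm/word-counter-nicolasventin | count_words.py | contadorpalabras
-- ===== SOURCE A (Python) =====
-- def contadorpalabras(palabras):
--     diccionario_palabras = {}
--     palabras = palabras.split()
--     for pala in palabras:
--         if pala in diccionario_palabras:
--             diccionario_palabras[pala]=diccionario_palabras[pala]+1
--         else:
--             diccionario_palabras[pala]=1
--     return diccionario_palabras
-- ===== SOURCE B (Python) =====
-- def contadorpalabras(palabras):
--     words = palabras.split()
--     return {w: words.count(w) for w in dict.fromkeys(words)}
-- ===== Notes on version B (the rewrite author's own statement) =====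
-- stated objective: simpler
-- what changed: Replaces the single accumulating dict pass with a dict comprehension over the first-occurrence-ordered distinct words, counting each with words.count (per-unique-word rescan instead of incremental updates).
import Mathlib
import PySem

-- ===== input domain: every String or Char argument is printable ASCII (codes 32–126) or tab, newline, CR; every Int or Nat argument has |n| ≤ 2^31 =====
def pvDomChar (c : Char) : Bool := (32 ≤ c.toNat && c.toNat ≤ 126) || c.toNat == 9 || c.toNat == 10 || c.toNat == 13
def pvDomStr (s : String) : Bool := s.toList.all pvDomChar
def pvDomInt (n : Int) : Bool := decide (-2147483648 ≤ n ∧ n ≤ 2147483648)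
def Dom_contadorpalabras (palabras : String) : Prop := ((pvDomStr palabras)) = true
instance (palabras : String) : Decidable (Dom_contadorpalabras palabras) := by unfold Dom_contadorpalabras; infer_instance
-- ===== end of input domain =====

-- B replaces A's single accumulating-dict pass with a dict comprehension over the distinct words, counting each by rescanning (simpler, not faster).
-- ===== PORT A =====
-- A: fold over the split words, incrementing the dict entry or initialising it to 1; returns the dict's items
def contadorpalabras (palabras : String) : List (String × Int) :=
  ((PySem.Str.split₀ palabras).foldl
    (fun d pala =>
      if d.contains pala then d.insert pala (d.getD pala 0 + 1)
      else d.insert pala 1)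
    PySem.Dict.empty).items

-- ===== PORT B =====
-- B: one counting expression per distinct word (dict comprehension over dict.fromkeys(words))
def contadorpalabras_alt (palabras : String) : List (String × Int) :=
  let words := PySem.Str.split₀ palabras
  (PySem.List.dedup words).map (fun w => (w, (PySem.List.count words w : Int)))

-- ===== PRECONDITION & SPEC =====
def Spec_contadorpalabras (palabras : String) (out : List (String × Int)) : Prop := out = contadorpalabras_alt palabras
instance (palabras : String) (out : List (String × Int)) : Decidable (Spec_contadorpalabras palabras out) := by unfold Spec_contadorpalabras; infer_instance

-- ===== CLAIM (what is proved, stated in full; the proofs are below) =====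
def Claim_equal_contadorpalabras : Prop := ∀ (palabras : String), Dom_contadorpalabras palabras → Spec_contadorpalabras palabras (contadorpalabras palabras)

-- ===== LEMMAS AND PROOFS =====

-- ===== VERDICT (by name: the statement is the Claim_ definition above) =====
lemma step_eq (d : PySem.Dict String Int) (x : String) :
    (if d.contains x then d.insert x (d.getD x 0 + 1) else d.insert x 1)
      = d.insert x (d.getD x 0 + 1) := by
  by_cases h : d.contains x = true
  · simp [h]
  · simp only [Bool.not_eq_true] at h
    simp [h, PySem.Dict.getD_of_not_contains]

theorem contadorpalabras_spec : Claim_equal_contadorpalabras := by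
  intro palabras _
  unfold Spec_contadorpalabras contadorpalabras contadorpalabras_alt
  have h : (fun (d : PySem.Dict String Int) pala =>
      if d.contains pala then d.insert pala (d.getD pala 0 + 1) else d.insert pala 1)
      = fun d x => d.insert x (d.getD x 0 + 1) :=
    funext fun d => funext fun x => step_eq d x
  rw [h, PySem.Dict.foldl_insert_getD_add_one_eq_counter, PySem.Dict.items_counter]
  simp [PySem.List.dedup_eq_ofList, PySem.List.count]
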